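-- pv_equiv track=rewrite | github.com/israelnan/backtracking_programme | puzzle_solver.py | look_left_max
-- ===== SOURCE A (Python) =====
-- from typing import List, Tuple, Set, Optional
--
-- Picture = List[List[int]]
--
-- def look_left_max(picture: Picture, row: int, col: int) -> int:
--     """
--     this function helps 'max_seen_cells' to count the non-definitely seen cells to the left from a given cell.
--     :param picture: 2D list with all black cells as 0, white cells as 1, and non-decided yet as -1.
--     :param row: the row ind of the given cell.
--     :param col: the col ind of the given cell.
--     :return: the number of non-definitely seen cells to the left from the given cell.
--     """
--     left_max_counter = 0
--     for i in range(col - 1, -1, -1):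
--         if picture[row][i] == 0:
--             return left_max_counter
--         else:
--             left_max_counter += 1
--     return left_max_counter
-- ===== SOURCE B (Python) =====
-- def look_left_max(picture, row, col):
--     if col <= 0:
--         return 0
--     rev = picture[row][:col][::-1]
--     if 0 in rev:
--         return rev.index(0)
--     return col
-- ===== Notes on version B (the rewrite author's own statement) =====
-- stated objective: alternative
-- what changed: Replaces A's index-by-index leftward counting loop with early return by slicing the row up to col, reversing the slice, and locating the first 0 with list.index (returning col if absent).
import Mathlib
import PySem

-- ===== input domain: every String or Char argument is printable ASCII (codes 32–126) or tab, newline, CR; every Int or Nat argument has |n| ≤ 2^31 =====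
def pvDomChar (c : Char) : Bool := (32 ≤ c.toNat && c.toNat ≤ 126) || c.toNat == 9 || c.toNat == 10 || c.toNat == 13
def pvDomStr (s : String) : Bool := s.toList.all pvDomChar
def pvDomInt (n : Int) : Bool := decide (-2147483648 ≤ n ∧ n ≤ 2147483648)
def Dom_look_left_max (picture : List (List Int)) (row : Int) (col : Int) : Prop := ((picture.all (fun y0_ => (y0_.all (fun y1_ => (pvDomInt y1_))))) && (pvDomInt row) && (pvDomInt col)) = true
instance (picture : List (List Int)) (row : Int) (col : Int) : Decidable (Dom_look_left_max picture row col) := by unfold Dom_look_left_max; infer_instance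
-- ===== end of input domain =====

-- B replaces A's leftward counting loop by reversing the left slice and locating the first 0 (alternative decomposition, same cost).

-- ===== PORT A =====
-- A's 'for i in range(col-1, -1, -1)' loop with early return, step for step.
def look_left_max_go (picture : List (List Int)) (row : Int) : List Int → Int → Int
  | [], acc => acc
  | i :: rest, acc =>
    if (PySem.List.pyGet? picture row).bind (fun r => PySem.List.pyGet? r i) = some 0 then acc
    else look_left_max_go picture row rest (acc + 1)

def look_left_max (picture : List (List Int)) (row : Int) (col : Int) : Int :=
  look_left_max_go picture row (PySem.List.pyRange (col - 1) (-1) (-1)) 0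

-- ===== PORT B =====
def look_left_max_alt (picture : List (List Int)) (row : Int) (col : Int) : Int :=
  if col ≤ 0 then 0
  else
    let rev := (PySem.List.slice ((PySem.List.pyGet? picture row).getD []) none (some col)).reverse
    match PySem.List.index? rev (0 : Int) with
    | some k => (k : Int)
    | none => col

-- ===== PRECONDITION & SPEC =====
-- Pre_ excludes exactly the inputs where A raises IndexError: col ≥ 1 with row out of range or col beyond the row's length.
def Pre_look_left_max (picture : List (List Int)) (row : Int) (col : Int) : Prop :=
  col ≤ 0 ∨ ((PySem.List.pyGet? picture row).isSome ∧
             col ≤ (((PySem.List.pyGet? picture row).getD []).length : Int))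
instance (picture : List (List Int)) (row : Int) (col : Int) : Decidable (Pre_look_left_max picture row col) := by unfold Pre_look_left_max; infer_instance

def pvWitness_look_left_max : List (List Int) × Int × Int := ([[1, 0, -1, 1]], 0, 3)

def Spec_look_left_max (picture : List (List Int)) (row : Int) (col : Int) (out : Int) : Prop := out = look_left_max_alt picture row col
instance (picture : List (List Int)) (row : Int) (col : Int) (out : Int) : Decidable (Spec_look_left_max picture row col out) := by unfold Spec_look_left_max; infer_instance

-- ===== CLAIM (what is proved, stated in full; the proofs are below) =====
def Claim_equal_look_left_max : Prop := ∀ (picture : List (List Int)) (row : Int) (col : Int), Dom_look_left_max picture row col → Pre_look_left_max picture row col → Spec_look_left_max picture row col (look_left_max picture row col)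

-- ===== LEMMAS AND PROOFS =====

-- A's loop over indices n-1, …, 0 computes the position of the first 0 in (r.take n).reverse (or n if none).
theorem look_left_max_go_eq (picture : List (List Int)) (row : Int) (r : List Int)
    (h : PySem.List.pyGet? picture row = some r) (n : Nat) (hn : n ≤ r.length) (acc : Int) :
    look_left_max_go picture row (PySem.List.pyRange ((n : Int) - 1) (-1) (-1)) acc =
      match PySem.List.index? ((r.take n).reverse) (0 : Int) with
      | some k => acc + (k : Int)
      | none => acc + (n : Int) := by
  induction n generalizing acc with
  | zero =>
      rw [PySem.List.pyRange_neg_one_eq_nil (by omega)]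
      simp [look_left_max_go, PySem.List.index?]
  | succ m ih =>
      have hm : m < r.length := by omega
      have hcons : PySem.List.pyRange ((m : Int) + 1 - 1) (-1) (-1)
          = (m : Int) :: PySem.List.pyRange ((m : Int) - 1) (-1) (-1) := by
        have : ((m : Int) + 1 - 1) = (m : Int) := by ring
        rw [this, PySem.List.pyRange_neg_one_cons (by omega)]
      have htake : (r.take (m + 1)).reverse = r[m] :: (r.take m).reverse := by
        rw [List.take_add_one]
        simp [List.getElem?_eq_getElem hm]
      have hget : PySem.List.pyGet? r (m : Int) = some r[m] :=
        PySem.List.pyGet?_ofNat r m hm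
      push_cast
      rw [hcons]
      simp only [look_left_max_go, h, Option.bind_some, hget, htake]
      by_cases h0 : r[m] = (0 : Int)
      · rw [if_pos (by rw [h0]), h0, PySem.List.index?_cons_self]
        simp
      · rw [if_neg (by simpa using h0), ih (by omega), PySem.List.index?_cons_of_ne _ h0]
        cases hidx : PySem.List.index? ((r.take m).reverse) (0 : Int) with
        | none => simp; ring
        | some k => simp; ring

-- ===== VERDICT (by name: the statement is the Claim_ definition above) =====
theorem look_left_max_spec : Claim_equal_look_left_max := by
  intro picture row col _ hpre
  unfold Spec_look_left_max look_left_max look_left_max_alt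
  by_cases hc : col ≤ 0
  · rw [PySem.List.pyRange_neg_one_eq_nil (by omega)]
    simp [look_left_max_go, hc]
  · rcases hpre with hle | ⟨hsome, hlen⟩
    · omega
    obtain ⟨r, hr⟩ := Option.isSome_iff_exists.mp hsome
    rw [hr] at hlen
    simp only [Option.getD_some] at hlen
    have hcol : col = ((col.toNat : Nat) : Int) := by omega
    have hn : col.toNat ≤ r.length := by omega
    rw [if_neg hc, hr]
    simp only [Option.getD_some]
    rw [hcol, PySem.List.slice_to_natCast, look_left_max_go_eq picture row r hr col.toNat hn 0]
    cases hidx : PySem.List.index? ((r.take col.toNat).reverse) (0 : Int) with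
    | none => simp
    | some k => simp
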